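-- pv_equiv track=rewrite | github.com/vasilikliapets/QA03_onl | Pavel_Bohdan/Lesson_6/tms_6.py | letters_in_a_row
-- ===== SOURCE A (Python) =====
-- def letters_in_a_row(str_1):
--     """
--     Функция высчитывает количество букв написаных подряд
--     """
--     in_a_row = 1
--     result = [str_1[0]]
--     for i in range(0, (len(str_1) - 1)):
--         if str_1[i] == str_1[i+1]:
--             in_a_row += 1
--         else:
--             if in_a_row == 1:
--                 result.append(str_1[i + 1])
--                 in_a_row = 1
--             else:
--                 result.append(in_a_row)
--                 result.append(str_1[i+1])
--                 in_a_row = 1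
--     if in_a_row > 1:
--         result.append(in_a_row)
--     result = ''.join(map(str, result))
--     return result
-- ===== SOURCE B (Python) =====
-- def letters_in_a_row(str_1):
--     """
--     Run-length encoding by scanning whole runs with two indices.
--     """
--     parts = []
--     i, n = 0, len(str_1)
--     while i < n:
--         j = i + 1
--         while j < n and str_1[j] == str_1[i]:
--             j += 1
--         parts.append(str_1[i])
--         if j - i > 1:
--             parts.append(str(j - i))
--         i = j
--     return ''.join(parts)
-- ===== Notes on version B (the rewrite author's own statement) =====
-- stated objective: idiomatic
-- what changed: B replaces A's index-by-index state machine (a running counter reset at each boundary, with a post-loop flush) by a two-pointer run scan that consumes each maximal run of equal characters at once and emits char plus optional count per run.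
import Mathlib
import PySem

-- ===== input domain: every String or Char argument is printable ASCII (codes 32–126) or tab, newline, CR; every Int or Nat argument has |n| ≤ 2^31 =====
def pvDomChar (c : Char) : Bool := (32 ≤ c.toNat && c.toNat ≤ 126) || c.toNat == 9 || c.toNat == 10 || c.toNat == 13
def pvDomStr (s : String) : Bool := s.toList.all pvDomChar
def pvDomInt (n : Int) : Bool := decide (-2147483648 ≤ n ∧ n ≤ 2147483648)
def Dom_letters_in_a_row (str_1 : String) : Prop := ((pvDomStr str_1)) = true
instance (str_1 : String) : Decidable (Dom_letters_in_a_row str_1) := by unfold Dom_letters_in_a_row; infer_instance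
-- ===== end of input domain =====

-- B replaces A's per-index counter state machine by a two-pointer run scan (idiomatic run-length encode); equal on all nonempty inputs.

-- ===== PORT A =====
def letters_in_a_row (str_1 : String) : String :=
  let cs := str_1.toList
  let st := (PySem.List.pyRange 0 (PySem.Str.len str_1 - 1) 1).foldl
    (fun (st : Int × List String) i =>
      if PySem.List.pyGetD cs i ' ' == PySem.List.pyGetD cs (i+1) ' ' then
        (st.1 + 1, st.2)
      else
        if st.1 == 1 then
          (1, st.2 ++ [String.mk [PySem.List.pyGetD cs (i+1) ' ']])
        else
          (1, st.2 ++ [PySem.Int.toStr st.1, String.mk [PySem.List.pyGetD cs (i+1) ' ']]))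
    (1, [String.mk [PySem.List.pyGetD cs 0 ' ']])
  PySem.Str.join "" (if st.1 > 1 then st.2 ++ [PySem.Int.toStr st.1] else st.2)

-- ===== PORT B =====
-- B's inner 'while j < n and str_1[j] == str_1[i]' is the takeWhile/dropWhile of the run at i.
def runsAlt : List Char → List String
  | [] => []
  | c :: rest =>
    (String.mk [c] ::
      (if (rest.takeWhile (fun x => x == c)).length + 1 > 1
        then [PySem.Int.toStr (((rest.takeWhile (fun x => x == c)).length : Int) + 1)] else []))
      ++ runsAlt (rest.dropWhile (fun x => x == c))
termination_by cs => cs.length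
decreasing_by
  exact Nat.lt_succ_of_le (List.length_dropWhile_le _ _)

def letters_in_a_row_alt (str_1 : String) : String :=
  PySem.Str.join "" (runsAlt str_1.toList)

-- ===== PRECONDITION & SPEC =====
-- Pre_ excludes only the empty string, where A raises IndexError on str_1[0].
def Pre_letters_in_a_row (str_1 : String) : Prop := str_1 ≠ ""
instance (str_1 : String) : Decidable (Pre_letters_in_a_row str_1) := by unfold Pre_letters_in_a_row; infer_instance
def pvWitness_letters_in_a_row : String := "aab"

def Spec_letters_in_a_row (str_1 : String) (out : String) : Prop := out = letters_in_a_row_alt str_1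
instance (str_1 : String) (out : String) : Decidable (Spec_letters_in_a_row str_1 out) := by unfold Spec_letters_in_a_row; infer_instance

-- ===== CLAIM (what is proved, stated in full; the proofs are below) =====
def Claim_equal_letters_in_a_row : Prop := ∀ (str_1 : String), Dom_letters_in_a_row str_1 → Pre_letters_in_a_row str_1 → Spec_letters_in_a_row str_1 (letters_in_a_row str_1)

-- ===== LEMMAS AND PROOFS =====

-- A's loop body on an adjacent pair of characters.
def stepA (st : Int × List String) (p : Char × Char) : Int × List String :=
  if p.1 == p.2 then (st.1 + 1, st.2)
  else if st.1 == 1 then (1, st.2 ++ [String.mk [p.2]])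
  else (1, st.2 ++ [PySem.Int.toStr st.1, String.mk [p.2]])

-- A's post-loop flush of the final counter.
def finA (st : Int × List String) : List String :=
  if st.1 > 1 then st.2 ++ [PySem.Int.toStr st.1] else st.2

-- The output that remains when the current run (char c, k seen so far) continues into rest.
def restRuns (c : Char) (rest : List Char) (k : Int) : List String :=
  (if k + (rest.takeWhile (fun x => x == c)).length > 1
    then [PySem.Int.toStr (k + ((rest.takeWhile (fun x => x == c)).length : Int))] else [])
  ++ runsAlt (rest.dropWhile (fun x => x == c))

lemma runsAlt_cons (r : Char) (t : List Char) :
    runsAlt (r :: t) = String.mk [r] :: restRuns r t 1 := by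
  rw [runsAlt, restRuns]
  have h : ((t.takeWhile (fun x => x == r)).length + 1 > 1) ↔
      ((1 : Int) + ((t.takeWhile (fun x => x == r)).length : Int) > 1) := by
    constructor <;> intro <;> omega
  by_cases hc : (t.takeWhile (fun x => x == r)).length + 1 > 1
  · simp only [if_pos hc, if_pos (h.mp hc)]
    simp [add_comm]
  · simp only [if_neg hc, if_neg (fun hh => hc (h.mpr hh))]
    simp

lemma foldA_runs (rest : List Char) : ∀ (c : Char) (k : Int) (acc : List String), 1 ≤ k →
    finA (((c :: rest).zip rest).foldl stepA (k, acc)) = acc ++ restRuns c rest k := by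
  induction rest with
  | nil =>
    intro c k acc hk
    simp only [List.zip_nil_right, List.foldl_nil, finA, restRuns, List.takeWhile_nil,
      List.dropWhile_nil, runsAlt, List.length_nil, Int.natCast_zero, add_zero, List.append_nil]
    split_ifs <;> simp
  | cons r t ih =>
    intro c k acc hk
    rw [List.zip_cons_cons, List.foldl_cons]
    by_cases hcr : c = r
    · subst hcr
      have hstep : stepA (k, acc) (c, c) = (k + 1, acc) := by simp [stepA]
      rw [hstep, ih c (k+1) acc (by omega)]
      rw [restRuns, restRuns]
      simp only [List.takeWhile_cons, List.dropWhile_cons, beq_self_eq_true, if_true,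
        BEq.rfl, ite_true, List.length_cons]
      have harith : k + (((t.takeWhile (fun x => x == c)).length : Int) + 1)
          = k + 1 + ((t.takeWhile (fun x => x == c)).length : Int) := by ring
      push_cast
      rw [harith]
    · have hne : (c == r) = false := by simp [hcr]
      have hrw : restRuns c (r :: t) k
          = (if k > 1 then [PySem.Int.toStr k] else []) ++ runsAlt (r :: t) := by
        rw [restRuns]
        simp only [List.takeWhile_cons, List.dropWhile_cons, hne]  -- hne dispatches the run test
        simp [Ne.symm hcr]
      by_cases hk1 : k = 1
      · subst hk1
        have hstep : stepA (1, acc) (c, r) = (1, acc ++ [String.mk [r]]) := by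
          simp [stepA, hne]
        rw [hstep, ih r 1 (acc ++ [String.mk [r]]) (by omega), hrw]
        rw [runsAlt_cons]
        simp
      · have hstep : stepA (k, acc) (c, r)
            = (1, acc ++ [PySem.Int.toStr k, String.mk [r]]) := by
          simp [stepA, hne, hk1]
        rw [hstep, ih r 1 (acc ++ [PySem.Int.toStr k, String.mk [r]]) (by omega), hrw]
        rw [runsAlt_cons]
        have : k > 1 := by omega
        simp [this]

lemma fold_idx_eq_pairs (c : Char) (rest : List Char) (init : Int × List String) :
    (PySem.List.pyRange 0 (((c :: rest).length : Int) - 1) 1).foldl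
      (fun (st : Int × List String) i =>
        if PySem.List.pyGetD (c :: rest) i ' ' == PySem.List.pyGetD (c :: rest) (i+1) ' ' then
          (st.1 + 1, st.2)
        else
          if st.1 == 1 then
            (1, st.2 ++ [String.mk [PySem.List.pyGetD (c :: rest) (i+1) ' ']])
          else
            (1, st.2 ++ [PySem.Int.toStr st.1, String.mk [PySem.List.pyGetD (c :: rest) (i+1) ' ']]))
      init
    = ((c :: rest).zip rest).foldl stepA init := by
  have hplen : ((c :: rest).zip rest).length = rest.length := by
    simp [List.length_zip]
  have hlen : ((c :: rest).length : Int) - 1 = PySem.List.len ((c :: rest).zip rest) := by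
    rw [PySem.List.len, hplen]; simp
  rw [hlen, ← PySem.List.foldl_pyRange_zero_pyGetD ((c :: rest).zip rest) ((' ', ' ')) stepA init]
  apply PySem.List.foldl_congr_mem
  intro st i hi
  rw [PySem.List.mem_pyRange_one] at hi
  obtain ⟨hi0, hilt⟩ := hi
  rw [PySem.List.len, hplen] at hilt
  have hin : i.toNat < ((c :: rest).zip rest).length := by rw [hplen]; omega
  have hi1 : i.toNat < rest.length := by omega
  have hg1 : PySem.List.pyGetD (c :: rest) i ' ' = (c :: rest)[i.toNat]'(by simp; omega) := by
    rw [PySem.List.pyGetD_of_nonneg _ _ hi0, List.getD_eq_getElem _ _ (by simp; omega)]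
  have hg2 : PySem.List.pyGetD (c :: rest) (i+1) ' ' = rest[i.toNat] := by
    rw [PySem.List.pyGetD_of_nonneg _ _ (by omega)]
    have h1 : (i+1).toNat = i.toNat + 1 := by omega
    rw [h1, List.getD_eq_getElem _ _ (by simp; omega), List.getElem_cons_succ]
  have hgp : PySem.List.pyGetD ((c :: rest).zip rest) i ((' ', ' '))
      = ((c :: rest)[i.toNat]'(by simp; omega), rest[i.toNat]) := by
    rw [PySem.List.pyGetD_of_nonneg _ _ hi0, List.getD_eq_getElem _ _ hin, List.getElem_zip]
  rw [hg1, hg2, hgp]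
  rfl

-- ===== VERDICT =====
theorem letters_in_a_row_spec : Claim_equal_letters_in_a_row := by
  intro str_1 _hdom hpre
  unfold Spec_letters_in_a_row
  replace hpre : str_1 ≠ "" := hpre
  obtain ⟨c, rest, hcs⟩ : ∃ c rest, str_1.toList = c :: rest := by
    cases h : str_1.toList with
    | nil => exact absurd (String.toList_eq_nil_iff.mp h) hpre
    | cons c rest => exact ⟨c, rest, rfl⟩
  unfold letters_in_a_row letters_in_a_row_alt
  have hlenstr : PySem.Str.len str_1 - 1 = ((c :: rest).length : Int) - 1 := by
    rw [PySem.Str.len_eq, hcs]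
  simp only [hcs, hlenstr]
  rw [fold_idx_eq_pairs c rest]
  have hget0 : PySem.List.pyGetD (c :: rest) 0 ' ' = c := by
    simp [PySem.List.pyGetD]
  rw [hget0]
  show PySem.Str.join "" (finA (((c :: rest).zip rest).foldl stepA (1, [String.mk [c]])))
      = PySem.Str.join "" (runsAlt (c :: rest))
  rw [foldA_runs rest c 1 [String.mk [c]] (by omega), runsAlt_cons]
  rfl
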